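-- pv_equiv track=rewrite | github.com/YeetmanLord/Python-CPP-Compiler | compiler.py | parse_all_types
-- ===== SOURCE A (Python) =====
-- def parse_all_types(assignment: str):
--     operators = ["+", "-", "*", "/", "%", ">",
--                  "<", "&", "|", "^", "~", "<<", ">>"]
--     two_char_operators = ["**", "//", "==", "!=", ">=", "<=", "is", "or", "in"]
--     three_char_operators = ["and", "not"]
--     five_char_operators = ["is not", "not in"]
--
--     types = []
--     index = 0
--     last = 0
--     while index < len(assignment):
--         char = assignment[index]
--         if assignment[index: index + 5] in five_char_operators:
--             types.append(assignment[last: index])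
--             last = index
--             index += 5
--         elif assignment[index: index + 3] in three_char_operators:
--             types.append(assignment[last: index])
--             last = index
--             index += 3
--         elif assignment[index: index + 2] in two_char_operators:
--             types.append(assignment[last: index])
--             last = index
--             index += 2
--         elif char in operators:
--             types.append(assignment[last: index])
--             last = index
--             index += 1
--         else:
--             index += 1
--
--     return types
-- ===== SOURCE B (Python) =====
-- import re
--
-- _OPERATOR_RE = re.compile("|".join(map(re.escape, [
--     "and", "not",
--     "**", "//", "==", "!=", ">=", "<=", "is", "or", "in",
--     "+", "-", "*", "/", "%", ">", "<", "&", "|", "^", "~"])))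
--
--
-- def parse_all_types(assignment: str):
--     bounds = [0] + [m.start() for m in _OPERATOR_RE.finditer(assignment)]
--     return [assignment[bounds[i]:bounds[i + 1]] for i in range(len(bounds) - 1)]
-- ===== Notes on version B (the rewrite author's own statement) =====
-- stated objective: faster
-- what changed: A's hand-rolled while loop comparing 5/3/2/1-character slices at every index is replaced by a single compiled regex alternation (longest alternatives first, dead '<<'/'>>'/'is not'/'not in' entries omitted): finditer collects the operator start positions and the tokens are the slices between consecutive boundaries, dropping the tail after the last operator exactly as A does.
import Mathlib
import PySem

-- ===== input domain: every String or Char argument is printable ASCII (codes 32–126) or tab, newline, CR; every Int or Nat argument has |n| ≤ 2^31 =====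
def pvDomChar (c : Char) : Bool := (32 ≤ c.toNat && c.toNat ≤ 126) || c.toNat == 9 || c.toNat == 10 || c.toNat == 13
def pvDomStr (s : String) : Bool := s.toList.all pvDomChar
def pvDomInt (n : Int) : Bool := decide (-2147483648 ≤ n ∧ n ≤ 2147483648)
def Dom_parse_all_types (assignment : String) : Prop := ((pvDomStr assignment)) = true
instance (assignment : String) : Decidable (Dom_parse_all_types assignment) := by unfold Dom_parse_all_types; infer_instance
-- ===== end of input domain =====

-- B replaces A's per-position cascade of slice comparisons by one operator-alternation match pass
-- (regex finditer) that collects operator start positions and then slices between consecutive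
-- boundaries (measurably faster by constant factor: one pass in the compiled regex engine).

-- ===== PORT A =====
-- A's operator tables, as lists of char-lists (Python compares string slices against them)
def pvA_operators : List (List Char) :=
  [['+'], ['-'], ['*'], ['/'], ['%'], ['>'], ['<'], ['&'], ['|'], ['^'], ['~'], ['<', '<'], ['>', '>']]
def pvA_two : List (List Char) :=
  [['*', '*'], ['/', '/'], ['=', '='], ['!', '='], ['>', '='], ['<', '='], ['i', 's'], ['o', 'r'], ['i', 'n']]
def pvA_three : List (List Char) := [['a', 'n', 'd'], ['n', 'o', 't']]
def pvA_five : List (List Char) := [['i', 's', ' ', 'n', 'o', 't'], ['n', 'o', 't', ' ', 'i', 'n']]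

-- the while loop; fuel = string length bounds the iteration count (index grows every step)
def pvA_loop (s : List Char) : Nat → Int → Int → List String → List String
  | 0, _, _, types => types
  | fuel + 1, index, last, types =>
    if index < PySem.Chars.len s then
      -- char = assignment[index]; always in range under the loop guard
      let char := (PySem.List.pyGet? s index).getD ' '
      if PySem.Chars.slice s (some index) (some (index + 5)) ∈ pvA_five then
        pvA_loop s fuel (index + 5) index (types ++ [String.ofList (PySem.Chars.slice s (some last) (some index))])
      else if PySem.Chars.slice s (some index) (some (index + 3)) ∈ pvA_three then
        pvA_loop s fuel (index + 3) index (types ++ [String.ofList (PySem.Chars.slice s (some last) (some index))])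
      else if PySem.Chars.slice s (some index) (some (index + 2)) ∈ pvA_two then
        pvA_loop s fuel (index + 2) index (types ++ [String.ofList (PySem.Chars.slice s (some last) (some index))])
      else if [char] ∈ pvA_operators then
        pvA_loop s fuel (index + 1) index (types ++ [String.ofList (PySem.Chars.slice s (some last) (some index))])
      else
        pvA_loop s fuel (index + 1) last types
    else types

def parse_all_types (assignment : String) : List String :=
  pvA_loop assignment.toList assignment.toList.length 0 0 []

-- ===== PORT B =====
-- the compiled alternation, in B's order: longest alternatives first, then A's list order
def pvAltOps : List (List Char) :=
  [['a', 'n', 'd'], ['n', 'o', 't'],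
   ['*', '*'], ['/', '/'], ['=', '='], ['!', '='], ['>', '='], ['<', '='], ['i', 's'], ['o', 'r'], ['i', 'n'],
   ['+'], ['-'], ['*'], ['/'], ['%'], ['>'], ['<'], ['&'], ['|'], ['^'], ['~']]

-- one regex-engine attempt: the first alternative matching at this position
def pvMatchAt (l : List Char) : Option (List Char) :=
  pvAltOps.find? (fun op => op.isPrefixOf l)

-- finditer: scan left to right, record each match's start, resume after the match
def pvScan : Nat → List Char → Nat → List Nat
  | 0, _, _ => []
  | fuel + 1, l, pos =>
    match pvMatchAt l with
    | some op => pos :: pvScan fuel (l.drop op.length) (pos + op.length)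
    | none =>
      match l with
      | [] => []
      | _ :: rest => pvScan fuel rest (pos + 1)

def parse_all_types_alt (assignment : String) : List String :=
  let s := assignment.toList
  let bounds := 0 :: pvScan s.length s 0
  (List.range (bounds.length - 1)).map (fun i =>
    String.ofList (PySem.Chars.slice s (some ((bounds.getD i 0 : Nat) : Int)) (some ((bounds.getD (i + 1) 0 : Nat) : Int))))

-- ===== PRECONDITION & SPEC =====
def Spec_parse_all_types (assignment : String) (out : List String) : Prop := out = parse_all_types_alt assignment
instance (assignment : String) (out : List String) : Decidable (Spec_parse_all_types assignment out) := by unfold Spec_parse_all_types; infer_instance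

-- ===== CLAIM (what is proved, stated in full; the proofs are below) =====
def Claim_equal_parse_all_types : Prop := ∀ (assignment : String), Dom_parse_all_types assignment → Spec_parse_all_types assignment (parse_all_types assignment)

-- ===== LEMMAS AND PROOFS =====

-- B's single-character alternatives (A's `operators` without its dead two-char entries)
def pvSingles : List (List Char) :=
  [['+'], ['-'], ['*'], ['/'], ['%'], ['>'], ['<'], ['&'], ['|'], ['^'], ['~']]

-- proof-side view of B's result: tokens between consecutive boundaries
def pvTokens (s : List Char) : Nat → List Nat → List String
  | _, [] => []
  | last, b :: bs => String.ofList ((s.drop last).take (b - last)) :: pvTokens s b bs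

theorem pvTokens_range (s : List Char) (starts : List Nat) (last : Nat) :
    (List.range starts.length).map (fun i =>
        String.ofList (PySem.Chars.slice s (some (((last :: starts).getD i 0 : Nat) : Int))
          (some (((last :: starts).getD (i + 1) 0 : Nat) : Int))))
      = pvTokens s last starts := by
  induction starts generalizing last with
  | nil => simp [pvTokens]
  | cons b bs ih =>
    rw [List.length_cons, List.range_succ_eq_map, List.map_cons, List.map_map]
    simp only [List.getD_cons_zero, List.getD_cons_succ]
    rw [pvTokens]
    congr 1
    · simp [PySem.List.slice_natCast]
    · exact ih b

theorem parse_all_types_alt_eq (assignment : String) :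
    parse_all_types_alt assignment
      = pvTokens assignment.toList 0 (pvScan assignment.toList.length assignment.toList 0) := by
  unfold parse_all_types_alt
  simp only [List.length_cons, Nat.add_sub_cancel]
  exact pvTokens_range assignment.toList _ 0

-- take-characterisation of prefixes, to convert A's slice tests into B's match tests
theorem pref_of_take {l w : List Char} {n : Nat} (hw : w.length = n) (h : l.take n = w) :
    w.isPrefixOf l = true := by
  rw [List.isPrefixOf_iff_prefix, List.prefix_iff_eq_take, hw, h]

theorem notpref_of_take {l w : List Char} {n : Nat} (hw : w.length = n) (h : l.take n ≠ w) :
    w.isPrefixOf l = false := by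
  rw [Bool.eq_false_iff]
  intro hp
  rw [List.isPrefixOf_iff_prefix, List.prefix_iff_eq_take, hw] at hp
  exact h hp.symm

theorem isPrefixOf_eq_take (w l : List Char) :
    w.isPrefixOf l = decide (l.take w.length = w) := by
  by_cases h : l.take w.length = w
  · simp [h, pref_of_take rfl h]
  · simp [h, notpref_of_take rfl h]

-- characterisation of one alternation step by A's three live slice tests
theorem pvMatchAt_eq (l : List Char) :
    pvMatchAt l =
      if l.take 3 ∈ pvA_three then some (l.take 3)
      else if l.take 2 ∈ pvA_two then some (l.take 2)
      else if l.take 1 ∈ pvSingles then some (l.take 1)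
      else none := by
  simp only [pvMatchAt, pvAltOps, List.find?, isPrefixOf_eq_take, List.length_cons,
    List.length_nil, Nat.zero_add, pvA_three, pvA_two, pvSingles, List.mem_cons,
    List.not_mem_nil, or_false]
  split_ifs with h3 h2 h1
  · rcases h3 with h | h <;> simp_all
  · rcases h2 with h | h | h | h | h | h | h | h | h <;> simp_all
  · rcases h1 with h | h | h | h | h | h | h | h | h | h | h <;> simp_all
  · simp_all

theorem slice_take (s : List Char) (i k : Nat) :
    PySem.Chars.slice s (some (i : Int)) (some ((i : Int) + (k : Nat))) = (s.drop i).take k := by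
  have h : ((i : Int) + (k : Nat)) = ((i + k : Nat) : Int) := by push_cast; ring
  rw [h, PySem.Chars.slice_eq_listSlice, PySem.List.slice_natCast]
  simp

-- A's five-char test can never fire: the slice has length ≤ 5, the table entries length 6
theorem five_dead (l : List Char) : l.take 5 ∉ pvA_five := by
  intro h
  have hle : (l.take 5).length ≤ 5 := by simp [List.length_take]
  rcases (by simpa [pvA_five] using h) with h6 | h6 <;> rw [h6] at hle <;> simp at hle

theorem take_one_head (s : List Char) (index : Nat) (h : index < s.length) :
    (s.drop index).take 1 = [s[index]] := by
  rw [List.take_one, List.head?_drop]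
  simp [List.getElem?_eq_getElem h]

-- main loop invariant: A's loop equals the tokens of B's scan over the remaining suffix
theorem loop_eq (s : List Char) : ∀ (fuel index last : Nat) (types : List String),
    pvA_loop s fuel (index : Int) (last : Int) types
      = types ++ pvTokens s last (pvScan fuel (s.drop index) index) := by
  intro fuel
  induction fuel with
  | zero => intro index last types; simp [pvA_loop, pvScan, pvTokens]
  | succ fuel ih =>
    intro index last types
    by_cases hidx : index < s.length
    · have hlen : ((index : Int) < PySem.Chars.len s) := by
        rw [PySem.Chars.len_eq]; exact_mod_cast hidx
      have hchar : (PySem.List.pyGet? s (index : Int)).getD ' ' = s[index] := by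
        simp [List.getElem?_eq_getElem hidx]
      have h5 : PySem.Chars.slice s (some (index : Int)) (some ((index : Int) + 5)) = (s.drop index).take 5 := by
        have := slice_take s index 5; norm_cast at this ⊢
      have h3 : PySem.Chars.slice s (some (index : Int)) (some ((index : Int) + 3)) = (s.drop index).take 3 := by
        have := slice_take s index 3; norm_cast at this ⊢
      have h2 : PySem.Chars.slice s (some (index : Int)) (some ((index : Int) + 2)) = (s.drop index).take 2 := by
        have := slice_take s index 2; norm_cast at this ⊢
      have htok : PySem.Chars.slice s (some (last : Int)) (some (index : Int)) = (s.drop last).take (index - last) := by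
        rw [PySem.Chars.slice_eq_listSlice, PySem.List.slice_natCast]
      rw [pvA_loop, if_pos hlen]
      simp only [hchar, h5, h3, h2, htok]
      rw [if_neg (five_dead (s.drop index))]
      have hscan : pvScan (fuel + 1) (s.drop index) index
          = match pvMatchAt (s.drop index) with
            | some op => index :: pvScan fuel ((s.drop index).drop op.length) (index + op.length)
            | none => match s.drop index with
                      | [] => []
                      | _ :: rest => pvScan fuel rest (index + 1) := rfl
      by_cases c3 : (s.drop index).take 3 ∈ pvA_three
      · rw [if_pos c3]
        have hm : pvMatchAt (s.drop index) = some ((s.drop index).take 3) := by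
          rw [pvMatchAt_eq, if_pos c3]
        have hl3 : ((s.drop index).take 3).length = 3 := by
          rcases (by simpa [pvA_three] using c3) with h | h <;> rw [h] <;> rfl
        rw [hscan, hm]
        simp only [hl3, List.drop_drop]
        have hcast : ((index : Int) + 3) = ((index + 3 : Nat) : Int) := by push_cast; ring
        rw [hcast, ih (index + 3) index]
        simp [pvTokens]
      · rw [if_neg c3]
        by_cases c2 : (s.drop index).take 2 ∈ pvA_two
        · rw [if_pos c2]
          have hm : pvMatchAt (s.drop index) = some ((s.drop index).take 2) := by
            rw [pvMatchAt_eq, if_neg c3, if_pos c2]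
          have hl2 : ((s.drop index).take 2).length = 2 := by
            rcases (by simpa [pvA_two] using c2) with h | h | h | h | h | h | h | h | h <;> rw [h] <;> rfl
          rw [hscan, hm]
          simp only [hl2, List.drop_drop]
          have hcast : ((index : Int) + 2) = ((index + 2 : Nat) : Int) := by push_cast; ring
          rw [hcast, ih (index + 2) index]
          simp [pvTokens]
        · rw [if_neg c2]
          by_cases c1 : [s[index]] ∈ pvA_operators
          · rw [if_pos c1]
            have c1' : (s.drop index).take 1 ∈ pvSingles := by
              rw [take_one_head s index hidx]
              revert c1; simp [pvA_operators, pvSingles]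
            have hm : pvMatchAt (s.drop index) = some ((s.drop index).take 1) := by
              rw [pvMatchAt_eq, if_neg c3, if_neg c2, if_pos c1']
            have hl1 : ((s.drop index).take 1).length = 1 := by
              rw [take_one_head s index hidx]; rfl
            rw [hscan, hm]
            simp only [hl1, List.drop_drop]
            have hcast : ((index : Int) + 1) = ((index + 1 : Nat) : Int) := by push_cast; ring
            rw [hcast, ih (index + 1) index]
            simp [pvTokens]
          · rw [if_neg c1]
            have c1' : (s.drop index).take 1 ∉ pvSingles := by
              rw [take_one_head s index hidx]
              revert c1; simp [pvA_operators, pvSingles]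
            have hm : pvMatchAt (s.drop index) = none := by
              rw [pvMatchAt_eq, if_neg c3, if_neg c2, if_neg c1']
            obtain ⟨c, rest, hd⟩ : ∃ c rest, s.drop index = c :: rest := by
              cases hcase : s.drop index with
              | nil => exfalso; have := List.drop_eq_nil_iff.mp hcase; omega
              | cons c rest => exact ⟨c, rest, rfl⟩
            have hrest : rest = s.drop (index + 1) := by
              have h' : List.drop 1 (List.drop index s) = List.drop (index + 1) s := List.drop_drop ..
              rw [hd] at h'
              simpa using h'
            rw [hscan, hm, hd]
            have hcast : ((index : Int) + 1) = ((index + 1 : Nat) : Int) := by push_cast; ring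
            rw [hcast, ih (index + 1) last]
            rw [hrest]
    · rw [pvA_loop, if_neg (by rw [PySem.Chars.len_eq]; exact_mod_cast hidx)]
      have hnil : s.drop index = [] := List.drop_eq_nil_iff.mpr (by omega)
      rw [hnil]
      have hs : pvScan (fuel + 1) [] index = [] := rfl
      rw [hs]
      simp [pvTokens]

-- ===== VERDICT (by name: the statement is the Claim_ definition above) =====
theorem parse_all_types_spec : Claim_equal_parse_all_types := by
  intro assignment _
  unfold Spec_parse_all_types
  rw [parse_all_types_alt_eq]
  have := loop_eq assignment.toList assignment.toList.length 0 0 []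
  simpa [parse_all_types] using this
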